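-- pv_equiv track=rewrite | github.com/speedbar/Codebase-Analyser | Codebase Analyser/codebase1/samplelabel.py | distribute_counts
-- ===== SOURCE A (Python) =====
-- def distribute_counts(count, radii):
--     # Distribute the counts across the radii values, starting from the outermost radius
--     distribution = [0] * len(radii)
--     remaining_count = count
--     for i in reversed(range(len(radii))):
--         if remaining_count <= 0:
--             break
--         # Allocate labels to the current radius
--         distribution[i] = min(remaining_count, count // len(radii) + (count % len(radii) if i == 0 else 0))
--         remaining_count -= distribution[i]
--     return distribution
-- ===== SOURCE B (Python) =====
-- def distribute_counts(count, radii):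
--     n = len(radii)
--     if n == 0 or count <= 0:
--         return [0] * n
--     base, rem = divmod(count, n)
--     return [base + rem] + [base] * (n - 1)
-- ===== Notes on version B (the rewrite author's own statement) =====
-- stated objective: simpler
-- what changed: Replaces the reversed greedy loop with remaining-count accumulator, min and break by a direct closed-form distribution: one divmod, base per slot, base+rem in slot 0.
import Mathlib
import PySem

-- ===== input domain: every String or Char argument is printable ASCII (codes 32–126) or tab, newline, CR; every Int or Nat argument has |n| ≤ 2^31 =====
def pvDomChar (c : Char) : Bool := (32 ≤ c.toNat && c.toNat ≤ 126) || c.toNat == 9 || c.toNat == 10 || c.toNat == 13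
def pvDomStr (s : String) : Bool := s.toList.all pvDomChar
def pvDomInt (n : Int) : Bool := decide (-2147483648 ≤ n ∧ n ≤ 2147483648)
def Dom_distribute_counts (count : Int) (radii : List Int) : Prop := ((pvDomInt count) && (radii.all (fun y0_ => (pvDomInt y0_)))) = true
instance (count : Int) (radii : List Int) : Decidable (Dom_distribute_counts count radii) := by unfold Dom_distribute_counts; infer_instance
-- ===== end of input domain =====

-- B replaces A's reversed greedy loop (remaining-count accumulator, min, break) by one divmod
-- and a closed-form list build; objective: simpler. Equal return value on every input.

-- ===== PORT A =====
-- the for-loop over reversed(range(len(radii))) with mutable distribution/remaining_count and break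
def pvALoop (count : Int) (n : Int) : List Nat → List Int → Int → List Int
  | [], dist, _ => dist
  | i :: is, dist, rem =>
      if rem ≤ 0 then dist
      else
        let v := min rem (PySem.Int.floordiv count n +
                  (if i = 0 then PySem.Int.mod count n else 0))
        pvALoop count n is (dist.set i v) (rem - v)

def distribute_counts (count : Int) (radii : List Int) : List Int :=
  let dist := List.replicate radii.length 0
  pvALoop count (radii.length : Int) ((List.range radii.length).reverse) dist count

-- ===== PORT B =====
def distribute_counts_alt (count : Int) (radii : List Int) : List Int :=
  let n := radii.length
  if n = 0 ∨ count ≤ 0 then List.replicate n 0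
  else
    let base := PySem.Int.floordiv count (n : Int)
    let rem := PySem.Int.mod count (n : Int)
    (base + rem) :: List.replicate (n - 1) base

-- ===== PRECONDITION & SPEC =====
def Spec_distribute_counts (count : Int) (radii : List Int) (out : List Int) : Prop := out = distribute_counts_alt count radii
instance (count : Int) (radii : List Int) (out : List Int) : Decidable (Spec_distribute_counts count radii out) := by unfold Spec_distribute_counts; infer_instance

-- ===== CLAIM (what is proved, stated in full; the proofs are below) =====
def Claim_equal_distribute_counts : Prop := ∀ (count : Int) (radii : List Int), Dom_distribute_counts count radii → Spec_distribute_counts count radii (distribute_counts count radii)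

-- ===== LEMMAS AND PROOFS =====

theorem pvALoop_of_nonpos (count n : Int) (is : List Nat) (dist : List Int) (rem : Int)
    (h : rem ≤ 0) : pvALoop count n is dist rem = dist := by
  cases is with
  | nil => rfl
  | cons i is => simp [pvALoop, h]

theorem pvALoop_get (count : Int) (n : Nat) (hn : 0 < n) (hc : 0 < count) :
    ∀ (j : Nat) (dist : List Int), j < n → dist.length = n →
      ∀ i, (pvALoop count (n : Int) ((List.range (j+1)).reverse) dist
              (count - ((n : Int) - 1 - (j : Int)) * PySem.Int.floordiv count (n : Int)))[i]? =
        if i = 0 then some (PySem.Int.floordiv count (n : Int) + PySem.Int.mod count (n : Int))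
        else if i ≤ j then some (PySem.Int.floordiv count (n : Int)) else dist[i]? := by
  have hnI : (0 : Int) < (n : Int) := by exact_mod_cast hn
  set base := PySem.Int.floordiv count (n : Int) with hbase
  set remv := PySem.Int.mod count (n : Int) with hremv
  have hkey : base * (n : Int) + remv = count := PySem.Int.floordiv_mul_add_mod count (n : Int)
  have hr0 : 0 ≤ remv := PySem.Int.mod_nonneg count hnI
  have hrlt : remv < (n : Int) := PySem.Int.mod_lt count hnI
  have hb0 : 0 ≤ base := by
    by_contra h
    push_neg at h
    have : base ≤ -1 := by omega
    nlinarith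
  have hpos : 0 < base + remv := by
    rcases lt_or_eq_of_le hb0 with h | h
    · omega
    · have : remv = count := by nlinarith
      omega
  intro j
  induction j with
  | zero =>
      intro dist hj hlen i
      simp only [Nat.cast_zero]
      have hrem : count - ((n : Int) - 1 - 0) * base = base + remv := by nlinarith
      rw [hrem]
      have hnb : ¬ (base + remv ≤ 0) := by omega
      simp only [List.range_succ, List.range_zero, List.nil_append, List.reverse_cons,
        List.reverse_nil, pvALoop, hnb, if_false, if_true]
      simp only [← hbase, ← hremv, if_pos rfl, min_self]
      rw [List.getElem?_set]
      by_cases h0' : i = 0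
      · subst h0'; simp [hlen, hn]
      · rw [if_neg (by omega : ¬ 0 = i), if_neg h0', if_neg (by omega : ¬ i ≤ 0)]
  | succ j ih =>
      intro dist hj hlen i
      have hge : base ≤ count - ((n : Int) - 2 - (j : Int)) * base := by
        have h1 : ((n : Int) - 2 - (j : Int)) * base ≤ ((n : Int) - 1) * base := by
          apply mul_le_mul_of_nonneg_right _ hb0
          omega
        nlinarith
      have hrpos : 0 < count - ((n : Int) - 2 - (j : Int)) * base := by
        have : base + remv ≤ count - ((n : Int) - 1) * base := by nlinarith
        have h1 : ((n : Int) - 2 - (j : Int)) * base ≤ ((n : Int) - 1) * base := by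
          apply mul_le_mul_of_nonneg_right _ hb0
          omega
        omega
      have hlist : (List.range (j+1+1)).reverse = (j+1) :: (List.range (j+1)).reverse := by
        rw [List.range_succ, List.reverse_append]; rfl
      have harg : count - ((n : Int) - 1 - ((j:Int)+1)) * base
            = count - ((n : Int) - 2 - (j : Int)) * base := by ring_nf
      rw [show ((j+1 : Nat) : Int) = (j : Int) + 1 by push_cast; ring] at *
      rw [harg, hlist]
      have hnb : ¬ (count - ((n : Int) - 2 - (j : Int)) * base ≤ 0) := by omega
      simp only [pvALoop, hnb, if_false]
      have hne : ¬ (j + 1 = 0) := by omega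
      simp only [← hbase, ← hremv, hne, if_false, if_neg hne, add_zero]
      have hmin : min (count - ((n : Int) - 2 - (j : Int)) * base) base = base :=
        min_eq_right hge
      rw [hmin]
      have hrec : count - ((n : Int) - 2 - (j : Int)) * base - base
            = count - ((n : Int) - 1 - (j : Int)) * base := by ring
      rw [hrec]
      rw [ih (dist.set (j+1) base) (by omega) (by simp [hlen]) i]
      rw [List.getElem?_set]
      by_cases h0 : i = 0
      · simp [h0]
      · simp only [h0, if_false]
        by_cases h1 : i ≤ j
        · simp [h1, (by omega : i ≤ j + 1)]
        · by_cases h2 : i = j + 1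
          · subst h2
            simp [hlen, (by omega : j + 1 < n)]
          · rw [if_neg (by omega : ¬ (j + 1 = i)), if_neg (by omega : ¬ (i ≤ j + 1)), if_neg h1]

theorem distribute_counts_eq (count : Int) (radii : List Int) :
    distribute_counts count radii = distribute_counts_alt count radii := by
  unfold distribute_counts distribute_counts_alt
  set n := radii.length with hn
  by_cases hz : n = 0 ∨ count ≤ 0
  · rw [if_pos hz]
    rcases hz with h | h
    · simp [h, pvALoop]
    · exact pvALoop_of_nonpos _ _ _ _ _ h
  · push_neg at hz
    obtain ⟨hn0, hc⟩ := hz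
    have hnpos : 0 < n := Nat.pos_of_ne_zero hn0
    have hcpos : 0 < count := by omega
    simp only [hn0, hc, or_self, if_neg, reduceIte]
    have hlist : List.range n = List.range ((n - 1) + 1) := by
      congr 1; omega
    have hstart : count - ((n : Int) - 1 - ((n - 1 : Nat) : Int)) * PySem.Int.floordiv count (n : Int) = count := by
      have : ((n - 1 : Nat) : Int) = (n : Int) - 1 := by omega
      rw [this]; ring
    apply List.ext_getElem?
    intro i
    have hmain := pvALoop_get count n hnpos hcpos (n - 1) (List.replicate n 0) (by omega) (by simp) i
    rw [hstart] at hmain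
    rw [hlist, hmain]
    simp only [false_or, if_neg (by omega : ¬ count ≤ 0)]
    by_cases h0 : i = 0
    · simp [h0]
    · simp only [h0, if_false, List.getElem?_cons, List.getElem?_replicate]
      by_cases h1 : i ≤ n - 1
      · simp [h1, h0, (by omega : i - 1 < n - 1)]
      · rw [if_neg h1, if_neg (by omega : ¬ (i < n)), if_neg (by omega : ¬ (i - 1 < n - 1))]

-- ===== VERDICT (by name: the statement is the Claim_ definition above) =====
theorem distribute_counts_spec : Claim_equal_distribute_counts := by
  intro count radii _
  unfold Spec_distribute_counts
  exact distribute_counts_eq count radii
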